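-- pv_equiv track=rewrite | github.com/Shaheer-776623/ICS3UO | Assignment2.py | find_best_dimensions
-- ===== SOURCE A (Python) =====
-- import math
--
-- def find_best_dimensions(total_photos):
--     best_perimeter = None
-- # assigns best_perimiter to nothing
--     best_dimensions = (1, total_photos)
-- # base dimension
--     for rows in range(1, int(math.sqrt(total_photos)) + 1):
-- # iterate through possible row values (sqrt function makes it efficient)
--         if total_photos % rows == 0:
-- # check if rows divide total_photos evenly using remainder
--             columns = total_photos // rows
-- # calculates columns
--             perimeter = (2 * rows) + (2 * columns)
-- # calculates perimeter
--             if best_perimeter is None or perimeter < best_perimeter: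
-- # check if this is the best perimeter
--                 best_perimeter = perimeter
-- # update best perimeter
--                 best_dimensions = (rows, columns)
-- # update best dimensions
--     return best_dimensions, best_perimeter
-- ===== SOURCE B (Python) =====
-- import math
--
-- def find_best_dimensions(total_photos):
--     # descend from floor(sqrt): the first divisor found is the largest one <= sqrt,
--     # which gives the minimal perimeter directly -- no running-best comparison needed.
--     start = int(math.sqrt(total_photos))
--     for rows in range(start, 0, -1):
--         if total_photos % rows == 0:
--             columns = total_photos // rows
--             return (rows, columns), (2 * rows) + (2 * columns)
--     return (1, total_photos), None
-- ===== Notes on version B (the rewrite author's own statement) =====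
-- stated objective: simpler
-- what changed: B scans divisor candidates downward from floor(sqrt(n)) and returns at the first divisor (the largest one below sqrt, hence minimal perimeter), eliminating A's running best_perimeter/best_dimensions accumulator.
import Mathlib
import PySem

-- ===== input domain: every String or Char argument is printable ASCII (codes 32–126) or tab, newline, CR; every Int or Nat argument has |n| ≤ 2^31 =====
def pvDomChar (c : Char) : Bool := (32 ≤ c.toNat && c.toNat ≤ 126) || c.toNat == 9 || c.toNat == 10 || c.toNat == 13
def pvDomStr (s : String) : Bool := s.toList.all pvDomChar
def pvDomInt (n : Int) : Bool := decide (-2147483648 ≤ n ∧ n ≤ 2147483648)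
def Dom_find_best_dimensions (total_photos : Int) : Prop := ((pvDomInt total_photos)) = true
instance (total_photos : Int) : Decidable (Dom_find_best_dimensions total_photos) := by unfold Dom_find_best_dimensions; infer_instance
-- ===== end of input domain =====

-- B replaces A's ascending scan with a running best by a descending scan that returns at the
-- first divisor below the square root (simpler: no accumulator); return values only, no mutation.

-- ===== PORT A =====
-- one loop iteration of A: the `if total_photos % rows == 0` body with state (best_dimensions, best_perimeter)
def fbdStep (n : Int) (st : (Int × Int) × Option Int) (rows : Int) : (Int × Int) × Option Int :=
  if PySem.Int.mod n rows = 0 then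
    let columns := PySem.Int.floordiv n rows
    let perimeter := 2 * rows + 2 * columns
    match st.2 with
    | none => ((rows, columns), some perimeter)                         -- best_perimeter is None
    | some bp => if perimeter < bp then ((rows, columns), some perimeter) else st
  else st

-- int(math.sqrt(n)) ported as Nat.sqrt n.toNat: exact for 0 ≤ n ≤ 2^31 (the float sqrt of such n
-- rounds to a value with the same floor); math.sqrt raises ValueError for n < 0 (excluded by Pre_).
def find_best_dimensions (total_photos : Int) : (Int × Int) × Option Int :=
  (PySem.List.pyRange 1 ((Nat.sqrt total_photos.toNat : Int) + 1)).foldl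
    (fbdStep total_photos) ((1, total_photos), none)

-- ===== PORT B =====
-- B's descending `for rows in range(start, 0, -1)` with early return: structural recursion downward
def altDesc (n : Int) : Nat → (Int × Int) × Option Int
  | 0 => ((1, n), none)
  | r + 1 =>
    let rows : Int := (r : Int) + 1
    if PySem.Int.mod n rows = 0 then
      let columns := PySem.Int.floordiv n rows
      ((rows, columns), some (2 * rows + 2 * columns))
    else altDesc n r

def find_best_dimensions_alt (total_photos : Int) : (Int × Int) × Option Int :=
  altDesc total_photos (Nat.sqrt total_photos.toNat)

-- ===== PRECONDITION & SPEC =====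
-- Pre_ excludes exactly the negative inputs, on which math.sqrt raises ValueError in A (and in B).
def Pre_find_best_dimensions (total_photos : Int) : Prop := 0 ≤ total_photos
instance (total_photos : Int) : Decidable (Pre_find_best_dimensions total_photos) := by unfold Pre_find_best_dimensions; infer_instance
def pvWitness_find_best_dimensions : Int := 12

def Spec_find_best_dimensions (total_photos : Int) (out : (Int × Int) × Option Int) : Prop := out = find_best_dimensions_alt total_photos
instance (total_photos : Int) (out : (Int × Int) × Option Int) : Decidable (Spec_find_best_dimensions total_photos out) := by unfold Spec_find_best_dimensions; infer_instance

-- ===== CLAIM (what is proved, stated in full; the proofs are below) =====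
def Claim_equal_find_best_dimensions : Prop := ∀ (total_photos : Int), Dom_find_best_dimensions total_photos → Pre_find_best_dimensions total_photos → Spec_find_best_dimensions total_photos (find_best_dimensions total_photos)

-- ===== LEMMAS AND PROOFS =====

-- characterization of B's descending loop: it returns the largest divisor d ≤ k (n ≥ 1, k ≥ 1)
theorem altDesc_char (n : Int) (hn : 1 ≤ n) (k : Nat) (hk : 1 ≤ k) :
    ∃ d : Nat, 1 ≤ d ∧ d ≤ k ∧ ((d : Int) ∣ n) ∧
      altDesc n k = (((d : Int), PySem.Int.floordiv n d),
                     some (2 * (d : Int) + 2 * PySem.Int.floordiv n d)) ∧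
      ∀ e : Nat, d < e → e ≤ k → ¬ ((e : Int) ∣ n) := by
  induction k with
  | zero => omega
  | succ r ih =>
    by_cases h : ((r : Int) + 1) ∣ n
    · refine ⟨r + 1, by omega, by omega, by exact_mod_cast h, ?_, ?_⟩
      · simp [altDesc, h]
      · intro e he1 he2 _; omega
    · rcases Nat.eq_zero_or_pos r with hr0 | hr1
      · subst hr0; exact absurd (one_dvd n) (by simpa using h)
      · obtain ⟨d, hd1, hd2, hdvd, heq, hmax⟩ := ih hr1
        refine ⟨d, hd1, by omega, hdvd, ?_, ?_⟩
        · simpa [altDesc, h] using heq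
        · intro e he1 he2 hdvd'
          rcases Nat.eq_or_lt_of_le he2 with h2 | h2
          · apply h
            have : ((e : Int)) = (r : Int) + 1 := by exact_mod_cast congrArg Nat.cast h2
            rwa [this] at hdvd'
          · exact hmax e he1 (by omega) hdvd'

-- among divisors below the square root, a larger divisor gives a strictly smaller perimeter
theorem perim_lt (n d e : Int) (hd1 : 1 ≤ d) (hde : d < e) (he2 : e * e ≤ n)
    (hdvd : d ∣ n) (hedvd : e ∣ n) :
    2 * e + 2 * PySem.Int.floordiv n e < 2 * d + 2 * PySem.Int.floordiv n d := by
  obtain ⟨a, ha⟩ := hdvd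
  obtain ⟨b, hb⟩ := hedvd
  have hda : PySem.Int.floordiv n d = a := by
    rw [PySem.Int.floordiv_eq_ediv_of_pos (by omega : (0:Int) < d), ha,
      Int.mul_ediv_cancel_left a (by omega : d ≠ 0)]
  have heb : PySem.Int.floordiv n e = b := by
    rw [PySem.Int.floordiv_eq_ediv_of_pos (by omega : (0:Int) < e), hb,
      Int.mul_ediv_cancel_left b (by omega : e ≠ 0)]
  rw [hda, heb]
  have hab : d * a = e * b := by rw [← ha, ← hb]
  have hea : e * e ≤ d * a := by rw [← ha]; exact he2
  have hprod : 0 < d * a - d * e := by nlinarith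
  have key : d * e * (d + a - e - b) = (e - d) * (d * a - d * e) := by linear_combination d * hab
  have hpos : 0 < d * e * (d + a - e - b) := by
    rw [key]; exact mul_pos (by omega) hprod
  nlinarith [hpos, mul_pos (show (0:Int) < d by omega) (show (0:Int) < e by omega)]

-- A's ascending fold over range(1, k+1) agrees with B's descending loop, for all k with k*k ≤ n
theorem loop_eq (n : Int) (hn : 1 ≤ n) (k : Nat) (hk : 1 ≤ k) (hkk : (k : Int) * (k : Int) ≤ n) :
    (PySem.List.pyRange 1 ((k : Int) + 1)).foldl (fbdStep n) ((1, n), none) = altDesc n k := by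
  induction k with
  | zero => omega
  | succ r ih =>
    have hcast : (((r + 1 : Nat)) : Int) = (r : Int) + 1 := by push_cast; ring
    rw [hcast]
    have hrange : PySem.List.pyRange 1 (((r : Int) + 1) + 1)
        = PySem.List.pyRange 1 ((r : Int) + 1) ++ [(r : Int) + 1] :=
      PySem.List.pyRange_one_succ_right (by omega)
    rcases Nat.eq_zero_or_pos r with hr0 | hr1
    · -- r = 0 : the range is [1]; both sides take the divisor 1
      subst hr0
      simp only [Nat.cast_zero, zero_add] at hrange ⊢
      rw [hrange]
      simp [altDesc, fbdStep, PySem.List.pyRange_one,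
        PySem.Int.floordiv_eq_ediv_of_pos (show (0:Int) < 1 by omega)]
    · -- r ≥ 1 : peel the last element and use the characterization of altDesc n r
      have hrr : (r : Int) * (r : Int) ≤ n := by
        have h1 : ((r : Int) + 1) * ((r : Int) + 1) ≤ n := by exact_mod_cast hkk
        nlinarith [Int.natCast_nonneg r]
      have hfold := ih hr1 hrr
      rw [hrange, List.foldl_append, hfold]
      obtain ⟨d, hd1, hd2, hdvd, heq, hmax⟩ := altDesc_char n hn r hr1
      by_cases h : ((r : Int) + 1) ∣ n
      · -- (r+1) divides n: A's comparison fires (strictly smaller perimeter), B returns here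
        have hlt := perim_lt n (d : Int) ((r : Int) + 1) (by exact_mod_cast hd1)
          (by exact_mod_cast Nat.lt_succ_of_le hd2) (by exact_mod_cast hkk) hdvd h
        rw [PySem.Int.floordiv_eq_ediv_of_pos (show (0:Int) < (r:Int) + 1 by positivity)] at hlt
        rw [heq]
        simp [fbdStep, altDesc, h, hlt]
      · -- (r+1) does not divide n: both keep the previous answer
        rw [heq]
        simp [fbdStep, altDesc, h, ← heq]

-- ===== VERDICT (by name: the statement is the Claim_ definition above) =====
theorem find_best_dimensions_spec : Claim_equal_find_best_dimensions := by
  intro n _ hpre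
  unfold Spec_find_best_dimensions find_best_dimensions find_best_dimensions_alt
  rcases eq_or_lt_of_le hpre with h0 | h0
  · rw [← h0]; decide
  · have hn : 1 ≤ n := h0
    have hsz : 1 ≤ Nat.sqrt n.toNat := by
      have : 1 ≤ n.toNat := by omega
      exact Nat.one_le_iff_ne_zero.mpr (by simpa [Nat.sqrt_eq_zero] using by omega)
    have hkk : ((Nat.sqrt n.toNat : Nat) : Int) * ((Nat.sqrt n.toNat : Nat) : Int) ≤ n := by
      have h1 := Nat.sqrt_le' n.toNat
      rw [pow_two] at h1
      have h2 : ((Nat.sqrt n.toNat * Nat.sqrt n.toNat : Nat) : Int) ≤ ((n.toNat : Nat) : Int) :=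
        Int.ofNat_le.mpr h1
      push_cast at h2
      rwa [Int.toNat_of_nonneg hpre] at h2
    exact loop_eq n hn (Nat.sqrt n.toNat) hsz hkk
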